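-- pv_equiv track=rewrite | github.com/namfohfalo/3DM | algorytm_zachlanny.py | greedy_3dm
-- ===== SOURCE A (Python) =====
-- def greedy_3dm(X, Y, Z, T):
--     solution = []  # List to store the selected triples
--
--     while T:
--         # Sort triples by size in ascending order
--         sorted_triples = sorted(T, key=lambda triple: len(set(triple)))
--
--         # Select the triple with the fewest elements
--         selected_triple = sorted_triples[0]
--
--         # Add the selected triple to the solution
--         solution.append(selected_triple)
--
--         # Remove any triples that share elements with the selected triple
--         T = [triple for triple in T if not any(element in selected_triple for element in triple)]
--
--     return solution
-- ===== SOURCE B (Python) =====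
-- def greedy_3dm(X, Y, Z, T):
--     solution = []
--     used = set()
--     # one stable sort, then a single greedy pass keeping triples disjoint from 'used'
--     for triple in sorted(T, key=lambda triple: len(set(triple))):
--         if all(element not in used for element in triple):
--             solution.append(triple)
--             used.update(triple)
--     return solution
-- ===== Notes on version B (the rewrite author's own statement) =====
-- stated objective: alternative
-- what changed: A re-sorts and re-filters the remaining triples on every iteration of its while loop; B sorts T once by len(set(triple)) (stable) and makes a single pass over the sorted list with a 'used' set, which by stability selects exactly the same triples in the same order.
-- outside the precondition, e.g. on greedy_3dm([], [], [], [()]): A does not finish within the time limit, B returns [()]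
import Mathlib
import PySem

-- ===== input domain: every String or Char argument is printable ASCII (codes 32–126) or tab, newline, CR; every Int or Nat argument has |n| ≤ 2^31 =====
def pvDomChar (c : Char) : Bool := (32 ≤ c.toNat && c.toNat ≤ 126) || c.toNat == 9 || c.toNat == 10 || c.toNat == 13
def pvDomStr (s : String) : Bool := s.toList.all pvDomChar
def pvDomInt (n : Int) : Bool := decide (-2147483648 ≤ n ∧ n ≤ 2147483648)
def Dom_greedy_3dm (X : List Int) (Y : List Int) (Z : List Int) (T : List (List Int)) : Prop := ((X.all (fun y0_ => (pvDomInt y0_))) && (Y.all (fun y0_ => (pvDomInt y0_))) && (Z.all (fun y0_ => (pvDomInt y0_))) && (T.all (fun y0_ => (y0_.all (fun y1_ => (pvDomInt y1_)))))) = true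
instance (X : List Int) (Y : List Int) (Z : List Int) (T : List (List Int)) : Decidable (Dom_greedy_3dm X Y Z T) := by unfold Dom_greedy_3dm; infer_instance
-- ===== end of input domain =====

-- B replaces A's sort-every-round-and-refilter loop by one stable sort plus a single
-- greedy pass over it with a `used` set; same selections in the same order.

-- ===== PORT A =====
-- key=lambda triple: len(set(triple))
def pvKey (t : List Int) : Nat := (PySem.Set.ofList t).length

-- A's while loop. fuel bounds the iterations: on Pre_ (no empty triple) each round
-- removes at least the selected triple, so fuel = T.length suffices; when T contains
-- an empty triple the Python loops forever (excluded by Pre_).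
def pvLoopA : Nat → List (List Int) → List (List Int)
  | _, [] => []
  | 0, _ :: _ => []
  | fuel + 1, a :: ts =>
      match PySem.List.sorted (a :: ts) pvKey false with
      | [] => []   -- unreachable: sorted of a nonempty list is nonempty
      | sel :: _ =>
          sel :: pvLoopA fuel ((a :: ts).filter fun tr => !(tr.any fun e => sel.contains e))

def greedy_3dm (X : List Int) (Y : List Int) (Z : List Int) (T : List (List Int)) : List (List Int) :=
  pvLoopA T.length T

-- ===== PORT B =====
-- the single pass of Source B: keep a triple iff all its elements avoid `used`
def pvPassB : List (List Int) → PySem.Set Int → List (List Int)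
  | [], _ => []
  | t :: rest, used =>
      if t.all (fun e => !(PySem.Set.contains used e)) then
        t :: pvPassB rest (PySem.Set.update used t)
      else
        pvPassB rest used

def greedy_3dm_alt (X : List Int) (Y : List Int) (Z : List Int) (T : List (List Int)) : List (List Int) :=
  pvPassB (PySem.List.sorted T pvKey false) PySem.Set.empty

-- ===== PRECONDITION & SPEC =====
-- Pre_ excludes T containing an empty triple: there Python A never returns (the empty
-- triple is re-selected every round and never removed, an infinite loop).
def Pre_greedy_3dm (X : List Int) (Y : List Int) (Z : List Int) (T : List (List Int)) : Prop :=
  ([] : List Int) ∉ T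
instance (X : List Int) (Y : List Int) (Z : List Int) (T : List (List Int)) : Decidable (Pre_greedy_3dm X Y Z T) := by unfold Pre_greedy_3dm; infer_instance

def pvWitness_greedy_3dm : List Int × List Int × List Int × List (List Int) :=
  ([1, 2], [3, 4], [5, 6], [[1, 3, 5], [1, 4, 6], [2, 4, 6]])

def Spec_greedy_3dm (X : List Int) (Y : List Int) (Z : List Int) (T : List (List Int)) (out : List (List Int)) : Prop := out = greedy_3dm_alt X Y Z T
instance (X : List Int) (Y : List Int) (Z : List Int) (T : List (List Int)) (out : List (List Int)) : Decidable (Spec_greedy_3dm X Y Z T out) := by unfold Spec_greedy_3dm; infer_instance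

-- ===== CLAIM (what is proved, stated in full; the proofs are below) =====
def Claim_equal_greedy_3dm : Prop := ∀ (X : List Int) (Y : List Int) (Z : List Int) (T : List (List Int)), Dom_greedy_3dm X Y Z T → Pre_greedy_3dm X Y Z T → Spec_greedy_3dm X Y Z T (greedy_3dm X Y Z T)

-- ===== LEMMAS AND PROOFS =====

-- abbreviation used only in the proofs
def pvIns (x : List Int) (ys : List (List Int)) : List (List Int) :=
  PySem.List.insertBy (fun a b => decide (pvKey a < pvKey b)) x ys

lemma pairwise_pvIns (x : List Int) :
    ∀ ys : List (List Int), ys.Pairwise (fun a b => pvKey a ≤ pvKey b) →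
      (pvIns x ys).Pairwise (fun a b => pvKey a ≤ pvKey b) := by
  intro ys
  induction ys with
  | nil => intro _; simp [pvIns, PySem.List.insertBy]
  | cons y ys ih =>
      intro h
      rcases List.pairwise_cons.mp h with ⟨hy, hys⟩
      by_cases hb : pvKey x < pvKey y
      · have : pvIns x (y :: ys) = x :: y :: ys := by
          simp [pvIns, PySem.List.insertBy, hb]
        rw [this]
        refine List.pairwise_cons.mpr ⟨?_, h⟩
        intro z hz
        rcases List.mem_cons.mp hz with hz | hz
        · subst hz; exact le_of_lt hb
        · exact le_trans (le_of_lt hb) (hy z hz)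
      · have : pvIns x (y :: ys) = y :: pvIns x ys := by
          simp [pvIns, PySem.List.insertBy, hb]
        rw [this]
        refine List.pairwise_cons.mpr ⟨?_, ih hys⟩
        intro z hz
        rcases (PySem.List.mem_insertBy _ x z ys).mp hz with hz | hz
        · subst hz; omega
        · exact hy z hz

lemma filter_pvIns (p : List Int → Bool) (x : List Int) :
    ∀ ys : List (List Int), ys.Pairwise (fun a b => pvKey a ≤ pvKey b) →
      (pvIns x ys).filter p = if p x then pvIns x (ys.filter p) else ys.filter p := by
  intro ys
  induction ys with
  | nil => intro _; by_cases hp : p x <;> simp [pvIns, PySem.List.insertBy, hp]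
  | cons y ys ih =>
      intro h
      rcases List.pairwise_cons.mp h with ⟨hy, hys⟩
      by_cases hb : pvKey x < pvKey y
      · have hx : pvIns x (y :: ys) = x :: y :: ys := by
          simp [pvIns, PySem.List.insertBy, hb]
        rw [hx]
        by_cases hp : p x
        · by_cases hpy : p y
          · have : (y :: ys).filter p = y :: ys.filter p := by simp [hpy]
            rw [this]
            have : pvIns x (y :: ys.filter p) = x :: y :: ys.filter p := by
              simp [pvIns, PySem.List.insertBy, hb]
            simp [hp, hpy, this]
          · have hfil : (y :: ys).filter p = ys.filter p := by simp [hpy]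
            rw [hfil]
            -- x goes to the front of ys.filter p since pvKey x < pvKey of every element
            have hfront : pvIns x (ys.filter p) = x :: ys.filter p := by
              cases hz : ys.filter p with
              | nil => simp [pvIns, PySem.List.insertBy]
              | cons z zs =>
                  have hzmem : z ∈ ys := by
                    have : z ∈ ys.filter p := by rw [hz]; exact List.mem_cons_self
                    exact List.mem_of_mem_filter this
                  have : pvKey x < pvKey z := lt_of_lt_of_le hb (hy z hzmem)
                  simp [pvIns, PySem.List.insertBy, this]
            simp [hp, hpy, hfront]
        · simp [hp]
      · have hx : pvIns x (y :: ys) = y :: pvIns x ys := by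
          simp [pvIns, PySem.List.insertBy, hb]
        rw [hx]
        by_cases hpy : p y
        · have hfil : (y :: ys).filter p = y :: ys.filter p := by simp [hpy]
          have : pvIns x (y :: ys.filter p) = y :: pvIns x (ys.filter p) := by
            simp [pvIns, PySem.List.insertBy, hb]
          by_cases hp : p x <;>
            simp [hpy, hfil, this, hp, ih hys]
        · have hfil : (y :: ys).filter p = ys.filter p := by simp [hpy]
          by_cases hp : p x <;> simp [hpy, hfil, hp, ih hys]

lemma foldl_pvIns_filter (p : List Int → Bool) :
    ∀ (xs : List (List Int)) (acc : List (List Int)),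
      acc.Pairwise (fun a b => pvKey a ≤ pvKey b) →
      (xs.foldl (fun a x => pvIns x a) acc).filter p
        = (xs.filter p).foldl (fun a x => pvIns x a) (acc.filter p) := by
  intro xs
  induction xs with
  | nil => intro acc _; rfl
  | cons x xs ih =>
      intro acc hacc
      have h1 : ((x :: xs).foldl (fun a x => pvIns x a) acc).filter p
          = (xs.filter p).foldl (fun a x => pvIns x a) ((pvIns x acc).filter p) := by
        simpa using ih (pvIns x acc) (pairwise_pvIns x acc hacc)
      rw [h1, filter_pvIns p x acc hacc]
      by_cases hp : p x
      · simp [hp]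
      · simp [hp]

lemma sorted_filter (p : List Int → Bool) (T : List (List Int)) :
    PySem.List.sorted (T.filter p) pvKey false = (PySem.List.sorted T pvKey false).filter p := by
  rw [PySem.List.sorted_eq_foldl_insertBy, PySem.List.sorted_eq_foldl_insertBy]
  have := (foldl_pvIns_filter p T [] (List.Pairwise.nil)).symm
  simpa [pvIns] using this

lemma passB_filter (sel : List Int) :
    ∀ (S : List (List Int)) (U : PySem.Set Int), (∀ e ∈ sel, e ∈ U) →
      pvPassB (S.filter fun tr => !(tr.any fun e => sel.contains e)) U = pvPassB S U := by
  intro S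
  induction S with
  | nil => intro U _; rfl
  | cons t S ih =>
      intro U hsub
      by_cases hc : t.any (fun e => sel.contains e) = true
      · -- t shares an element with sel, hence with U: both sides skip t
        obtain ⟨e, het, hes⟩ := List.any_eq_true.mp hc
        have heU : e ∈ U := hsub e (List.contains_iff_mem.mp hes)
        have hall : t.all (fun e => !(PySem.Set.contains U e)) = false := by
          refine List.all_eq_false.mpr ⟨e, het, ?_⟩
          rw [(PySem.Set.contains_iff U e).mpr heU]
          decide
        have hfil : (t :: S).filter (fun tr => !(tr.any fun e => sel.contains e)) =
            S.filter (fun tr => !(tr.any fun e => sel.contains e)) :=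
          List.filter_cons_of_neg (by simpa using hc)
        rw [hfil, ih U hsub]
        simp only [pvPassB, hall, Bool.false_eq_true, if_false]
      · have hfil : (t :: S).filter (fun tr => !(tr.any fun e => sel.contains e)) =
            t :: S.filter (fun tr => !(tr.any fun e => sel.contains e)) := by
          exact List.filter_cons_of_pos (by simpa using eq_false_of_ne_true hc)
        rw [hfil]
        by_cases hall : t.all (fun e => !(PySem.Set.contains U e)) = true
        · have hsub' : ∀ e ∈ sel, e ∈ PySem.Set.update U t :=
            fun e he => (PySem.Set.mem_update U t e).mpr (Or.inl (hsub e he))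
          simp only [pvPassB, hall, if_true]
          exact congrArg (t :: ·) (ih (PySem.Set.update U t) hsub')
        · simp only [pvPassB, eq_false_of_ne_true hall, Bool.false_eq_true, if_false]
          exact ih U hsub

lemma pvLoopA_eq_passB :
    ∀ (fuel : Nat) (T : List (List Int)) (U : PySem.Set Int),
      T.length ≤ fuel → ([] : List Int) ∉ T → (∀ t ∈ T, ∀ e ∈ t, e ∉ U) →
      pvLoopA fuel T = pvPassB (PySem.List.sorted T pvKey false) U := by
  intro fuel
  induction fuel with
  | zero =>
      intro T U hlen _ _
      have : T = [] := List.length_eq_zero_iff.mp (Nat.le_zero.mp hlen)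
      subst this; rfl
  | succ fuel ih =>
      intro T U hlen hpre hdisj
      cases T with
      | nil => rfl
      | cons a ts =>
          have hne : PySem.List.sorted (a :: ts) pvKey false ≠ [] := by
            simp [PySem.List.sorted_eq_nil_iff]
          obtain ⟨sel, S', hS⟩ := List.exists_cons_of_ne_nil hne
          have hselT : sel ∈ a :: ts := by
            rw [← PySem.List.mem_sorted (a :: ts) pvKey false, hS]
            exact List.mem_cons_self
          have hselne : sel ≠ [] := fun h => hpre (h ▸ hselT)
          have hany : (sel.any fun e => sel.contains e) = true := by
            obtain ⟨e, he⟩ := List.exists_mem_of_ne_nil sel hselne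
            exact List.any_eq_true.mpr ⟨e, he, List.contains_iff_mem.mpr he⟩
          have hL : pvLoopA (fuel + 1) (a :: ts)
              = sel :: pvLoopA fuel ((a :: ts).filter fun tr => !(tr.any fun e => sel.contains e)) := by
            simp only [pvLoopA, hS]
          have hallsel : sel.all (fun e => !(PySem.Set.contains U e)) = true := by
            refine List.all_eq_true.mpr fun e he => ?_
            have : e ∉ U := hdisj sel hselT e he
            have : U.contains e = false := by
              cases hcf : U.contains e
              · rfl
              · exact absurd ((PySem.Set.contains_iff U e).mp hcf) this
            rw [this]; decide
          have hR : pvPassB (PySem.List.sorted (a :: ts) pvKey false) U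
              = sel :: pvPassB S' (PySem.Set.update U sel) := by
            rw [hS]; simp only [pvPassB, hallsel, if_true]
          rw [hL, hR]
          congr 1
          have hlen' : ((a :: ts).filter fun tr => !(tr.any fun e => sel.contains e)).length ≤ fuel := by
            have : ((a :: ts).filter fun tr => !(tr.any fun e => sel.contains e)).length < (a :: ts).length :=
              List.length_filter_lt_length_iff_exists.mpr
                ⟨sel, hselT, by simp only [hany, Bool.not_true]; decide⟩
            simp only [List.length_cons] at this hlen ⊢
            omega
          have hpre' : ([] : List Int) ∉ ((a :: ts).filter fun tr => !(tr.any fun e => sel.contains e)) :=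
            fun h => hpre (List.mem_of_mem_filter h)
          have hdisj' : ∀ t ∈ ((a :: ts).filter fun tr => !(tr.any fun e => sel.contains e)),
              ∀ e ∈ t, e ∉ PySem.Set.update U sel := by
            intro t ht e he hmem
            have htT := List.mem_of_mem_filter ht
            have hpt := List.of_mem_filter ht
            rcases (PySem.Set.mem_update U sel e).mp hmem with hU | hsel
            · exact hdisj t htT e he hU
            · have hpt' : (!(t.any fun e => sel.contains e)) = true := hpt
              rw [List.any_eq_true.mpr ⟨e, he, List.contains_iff_mem.mpr hsel⟩] at hpt'
              exact absurd hpt' (by decide)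
          rw [ih _ _ hlen' hpre' hdisj', sorted_filter _ (a :: ts), hS]
          have hfil : ((sel :: S').filter fun tr => !(tr.any fun e => sel.contains e))
              = S'.filter fun tr => !(tr.any fun e => sel.contains e) := by
            exact List.filter_cons_of_neg (by simp only [hany, Bool.not_true]; decide)
          rw [hfil]
          exact passB_filter sel S' (PySem.Set.update U sel)
            (fun e he => (PySem.Set.mem_update U sel e).mpr (Or.inr he))

-- ===== VERDICT (by name: the statement is the Claim_ definition above) =====
theorem greedy_3dm_spec : Claim_equal_greedy_3dm := by
  intro X Y Z T _ hpre
  unfold Spec_greedy_3dm greedy_3dm greedy_3dm_alt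
  exact pvLoopA_eq_passB T.length T PySem.Set.empty le_rfl hpre (by intro t _ e _ h; cases h)
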